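-- pv_equiv track=rewrite | github.com/netpack/vaitp-auditor | deployment/generate_cli_docs.py | format_help_as_markdown
-- ===== SOURCE A (Python) =====
-- def format_help_as_markdown(help_text: str, title: str) -> str:
--     """Format CLI help text as markdown."""
--     if not help_text.strip():
--         return f"# {title}\n\n*Help text not available*\n"
--
--     lines = help_text.split('\n')
--     markdown_lines = [f"# {title}", ""]
--
--     in_code_block = False
--     current_section = None
--
--     for line in lines:
--         stripped = line.strip()
--
--         # Skip empty lines at the start
--         if not markdown_lines[-1] and not stripped:
--             continue
--
--         # Detect sections (usage, options, etc.)
--         if stripped.lower().startswith(('usage:', 'positional arguments:', 'optional arguments:', 'options:')):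
--             if in_code_block:
--                 markdown_lines.append("```")
--                 in_code_block = False
--
--             section_name = stripped.rstrip(':').title()
--             markdown_lines.extend(["", f"## {section_name}", ""])
--             current_section = section_name.lower()
--
--             if current_section == 'usage':
--                 markdown_lines.append("```")
--                 in_code_block = True
--
--             continue
--
--         # Handle different sections
--         if current_section == 'usage':
--             if not in_code_block:
--                 markdown_lines.append("```")
--                 in_code_block = True
--             markdown_lines.append(line)
--
--         elif current_section in ['positional arguments', 'optional arguments', 'options']:
--             if in_code_block:
--                 markdown_lines.append("```")
--                 in_code_block = False
--
--             # Format argument descriptions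
--             if line.startswith('  ') and not line.startswith('    '):
--                 # This is an argument name
--                 arg_name = line.strip().split()[0]
--                 rest_of_line = line.strip()[len(arg_name):].strip()
--                 if rest_of_line:
--                     markdown_lines.append(f"- **`{arg_name}`** {rest_of_line}")
--                 else:
--                     markdown_lines.append(f"- **`{arg_name}`**")
--             elif line.startswith('    '):
--                 # This is a description continuation
--                 markdown_lines.append(f"  {line.strip()}")
--             elif stripped:
--                 markdown_lines.append(line)
--
--         else:
--             # Default handling
--             if stripped:
--                 markdown_lines.append(line)
--
--     # Close any open code block
--     if in_code_block:
--         markdown_lines.append("```")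
--
--     # Clean up empty lines
--     cleaned_lines = []
--     prev_empty = False
--     for line in markdown_lines:
--         if not line.strip():
--             if not prev_empty:
--                 cleaned_lines.append("")
--             prev_empty = True
--         else:
--             cleaned_lines.append(line)
--             prev_empty = False
--
--     return "\n".join(cleaned_lines) + "\n"
-- ===== SOURCE B (Python) =====
-- def format_help_as_markdown(help_text: str, title: str) -> str:
--     """Format CLI help text as markdown (single fused pass, no separate cleanup)."""
--     if not help_text.strip():
--         return f"# {title}\n\n*Help text not available*\n"
--
--     out = [f"# {title}", ""]
--     prev_empty = True       # collapse state of the cleaned output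
--     last_raw_empty = True   # whether the last emitted raw line was ""
--     section = None
--
--     def emit(s):
--         nonlocal prev_empty, last_raw_empty
--         last_raw_empty = (s == "")
--         if s.strip():
--             out.append(s)
--             prev_empty = False
--         else:
--             if not prev_empty:
--                 out.append("")
--             prev_empty = True
--
--     def fmt_arg(line):
--         stripped = line.strip()
--         name = stripped.split()[0]
--         rest = stripped[len(name):].strip()
--         return f"- **`{name}`** {rest}" if rest else f"- **`{name}`**"
--
--     for line in help_text.split('\n'):
--         stripped = line.strip()
--         if last_raw_empty and not stripped:
--             continue
--         if stripped.lower().startswith(('usage:', 'positional arguments:', 'optional arguments:', 'options:')):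
--             if section == 'usage':
--                 emit("```")
--             header = stripped.rstrip(':').title()
--             emit("")
--             emit(f"## {header}")
--             emit("")
--             section = header.lower()
--             if section == 'usage':
--                 emit("```")
--         elif section == 'usage':
--             emit(line)
--         elif section in ('positional arguments', 'optional arguments', 'options'):
--             if line.startswith('  ') and not line.startswith('    '):
--                 emit(fmt_arg(line))
--             elif line.startswith('    '):
--                 emit('  ' + stripped)
--             elif stripped:
--                 emit(line)
--         elif stripped:
--             emit(line)
--
--     if section == 'usage':
--         emit("```")
--
--     return '\n'.join(out) + '\n'
-- ===== Notes on version B (the rewrite author's own statement) =====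
-- stated objective: simpler
-- what changed: B replaces A's two-phase pipeline (build a raw markdown_lines list, then a second blank-line-collapsing cleanup pass over it) with a single fused pass that emits already-cleaned lines through one emit helper, and drops A's redundant in_code_block flag (it always equals current_section == 'usage'), rendering argument lines via a small formatter function.
-- outside the precondition, e.g. on format_help_as_markdown('hello\n  \n', 'T'): A returns '# T\n\nhello\n', B returns '# T\n\nhello\n'
import Mathlib
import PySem

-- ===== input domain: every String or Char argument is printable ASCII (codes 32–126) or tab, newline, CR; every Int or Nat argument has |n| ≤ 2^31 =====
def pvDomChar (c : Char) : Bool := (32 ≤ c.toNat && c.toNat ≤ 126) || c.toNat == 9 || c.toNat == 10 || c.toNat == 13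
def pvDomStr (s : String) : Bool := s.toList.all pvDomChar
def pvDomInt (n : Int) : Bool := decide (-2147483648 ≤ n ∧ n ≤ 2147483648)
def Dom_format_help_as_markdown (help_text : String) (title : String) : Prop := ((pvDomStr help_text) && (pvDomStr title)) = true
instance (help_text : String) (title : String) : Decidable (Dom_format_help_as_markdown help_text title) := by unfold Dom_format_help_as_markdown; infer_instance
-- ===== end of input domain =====

-- B fuses A's build-then-clean two passes into one emitting pass and drops the redundant in_code_block state (objective: simpler).

-- ===== PORT A =====
-- shared string primitives absent from PySem (used by both Pythons via str.title / str.rstrip(':')):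
-- hand port of str.title(), exact on ASCII: a letter after a non-letter is uppercased, after a letter lowercased
def pvTitleGo (prevAlpha : Bool) : List Char → List Char
  | [] => []
  | c :: rest =>
      (if PySem.Chars.isalpha c then
        (if prevAlpha then PySem.Chars.lowerChar c else PySem.Chars.upperChar c)
      else c) :: pvTitleGo (PySem.Chars.isalpha c) rest

def pvTitle (cs : List Char) : List Char := pvTitleGo false cs

-- hand port of str.rstrip(':'), exact: drop trailing ':' characters
def pvRstripColon (cs : List Char) : List Char := (cs.reverse.dropWhile (· == ':')).reverse

def pvFence : List Char := "```".toList

-- stripped.lower().startswith(('usage:', 'positional arguments:', 'optional arguments:', 'options:'))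
def pvIsHeader (stripped : List Char) : Bool :=
  let low := PySem.Chars.lower stripped
  PySem.Chars.startswith low "usage:".toList ||
  PySem.Chars.startswith low "positional arguments:".toList ||
  PySem.Chars.startswith low "optional arguments:".toList ||
  PySem.Chars.startswith low "options:".toList

-- one iteration of A's main loop; state = (markdown_lines, in_code_block, current_section)
def pvStepA (st : List (List Char) × Bool × Option (List Char)) (line : List Char) :
    List (List Char) × Bool × Option (List Char) :=
  let md := st.1
  let ic := st.2.1
  let sect := st.2.2
  let stripped := PySem.Chars.strip line
  -- if not markdown_lines[-1] and not stripped: continue   (md is never empty: it starts with two elements)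
  if PySem.List.pyGetD md (-1) ([] : List Char) = [] ∧ stripped = [] then st
  else if pvIsHeader stripped = true then
    let md1 := if ic then md ++ [pvFence] else md
    let sectionName := pvTitle (pvRstripColon stripped)
    let md2 := md1 ++ [[], "## ".toList ++ sectionName, []]
    let cur := PySem.Chars.lower sectionName
    if cur = "usage".toList then (md2 ++ [pvFence], true, some cur) else (md2, false, some cur)
  else if sect = some "usage".toList then
    let md1 := if ic = false then md ++ [pvFence] else md
    (md1 ++ [line], true, sect)
  else if sect = some "positional arguments".toList ∨ sect = some "optional arguments".toList ∨
          sect = some "options".toList then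
    let md1 := if ic then md ++ [pvFence] else md
    if PySem.Chars.startswith line "  ".toList ∧ ¬ PySem.Chars.startswith line "    ".toList then
      -- stripped.split()[0] raises IndexError in Python when stripped is empty; Pre_ excludes those inputs
      let argName := (PySem.Chars.split₀ stripped).headD []
      -- stripped[len(arg_name):] : exact as drop, 0 ≤ len(arg_name) ≤ len(stripped)
      let rest := PySem.Chars.strip (stripped.drop argName.length)
      if rest ≠ [] then (md1 ++ ["- **`".toList ++ argName ++ "`** ".toList ++ rest], false, sect)
      else (md1 ++ ["- **`".toList ++ argName ++ "`**".toList], false, sect)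
    else if PySem.Chars.startswith line "    ".toList then
      (md1 ++ ["  ".toList ++ stripped], false, sect)
    else if stripped ≠ [] then (md1 ++ [line], false, sect)
    else (md1, false, sect)
  else
    if stripped ≠ [] then (md ++ [line], ic, sect) else st

-- one iteration of A's clean-up loop; state = (cleaned_lines, prev_empty)
def pvCleanStep (acc : List (List Char) × Bool) (line : List Char) : List (List Char) × Bool :=
  if PySem.Chars.strip line = [] then (if acc.2 then acc.1 else acc.1 ++ [[]], true)
  else (acc.1 ++ [line], false)

def format_help_as_markdown (help_text : String) (title : String) : String :=
  if PySem.Chars.strip help_text.toList = [] then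
    String.ofList ("# ".toList ++ title.toList ++ "\n\n*Help text not available*\n".toList)
  else
    let lines := PySem.Chars.splitOn help_text.toList "\n".toList
    let st := lines.foldl pvStepA (["# ".toList ++ title.toList, []], false, none)
    let md := if st.2.1 then st.1 ++ [pvFence] else st.1
    let cleaned := (md.foldl pvCleanStep ([], false)).1
    String.ofList (PySem.Chars.join "\n".toList cleaned ++ "\n".toList)

-- ===== PORT B =====
-- B's emit: appends to the already-cleaned output, tracking prev_empty and last_raw_empty
def pvEmit (buf : List (List Char) × Bool × Bool) (s : List Char) : List (List Char) × Bool × Bool :=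
  if PySem.Chars.strip s = [] then ((if buf.2.1 then buf.1 else buf.1 ++ [[]]), true, decide (s = []))
  else (buf.1 ++ [s], false, decide (s = []))

def pvFmtArg (line : List Char) : List Char :=
  let stripped := PySem.Chars.strip line
  -- stripped.split()[0] raises IndexError in Python when stripped is empty; Pre_ excludes those inputs
  let name := (PySem.Chars.split₀ stripped).headD []
  let rest := PySem.Chars.strip (stripped.drop name.length)
  if rest ≠ [] then "- **`".toList ++ name ++ "`** ".toList ++ rest
  else "- **`".toList ++ name ++ "`**".toList

-- one iteration of B's single pass; state = ((out, prev_empty, last_raw_empty), section)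
def pvStepB (st : (List (List Char) × Bool × Bool) × Option (List Char)) (line : List Char) :
    (List (List Char) × Bool × Bool) × Option (List Char) :=
  let buf := st.1
  let sect := st.2
  let stripped := PySem.Chars.strip line
  if buf.2.2 = true ∧ stripped = [] then st
  else if pvIsHeader stripped = true then
    let buf1 := if sect = some "usage".toList then pvEmit buf pvFence else buf
    let header := pvTitle (pvRstripColon stripped)
    let buf2 := pvEmit (pvEmit (pvEmit buf1 []) ("## ".toList ++ header)) []
    let cur := PySem.Chars.lower header
    if cur = "usage".toList then (pvEmit buf2 pvFence, some cur) else (buf2, some cur)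
  else if sect = some "usage".toList then (pvEmit buf line, sect)
  else if sect = some "positional arguments".toList ∨ sect = some "optional arguments".toList ∨
          sect = some "options".toList then
    if PySem.Chars.startswith line "  ".toList ∧ ¬ PySem.Chars.startswith line "    ".toList then
      (pvEmit buf (pvFmtArg line), sect)
    else if PySem.Chars.startswith line "    ".toList then
      (pvEmit buf ("  ".toList ++ stripped), sect)
    else if stripped ≠ [] then (pvEmit buf line, sect)
    else st
  else
    if stripped ≠ [] then (pvEmit buf line, sect) else st

def format_help_as_markdown_alt (help_text : String) (title : String) : String :=
  if PySem.Chars.strip help_text.toList = [] then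
    String.ofList ("# ".toList ++ title.toList ++ "\n\n*Help text not available*\n".toList)
  else
    let lines := PySem.Chars.splitOn help_text.toList "\n".toList
    let st := lines.foldl pvStepB ((["# ".toList ++ title.toList, []], true, true), none)
    let buf := if st.2 = some "usage".toList then pvEmit st.1 pvFence else st.1
    String.ofList (PySem.Chars.join "\n".toList buf.1 ++ "\n".toList)

-- ===== PRECONDITION & SPEC =====
-- Pre_ excludes help texts containing a line indented by exactly two-or-three spaces that is otherwise blank:
-- inside an argument section such a line makes A's stripped.split()[0] raise IndexError (outside one, A returns
-- normally and B returns the same value — the exclusion is a closed-form over-approximation of the crash).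
def Pre_format_help_as_markdown (help_text : String) (title : String) : Prop :=
  ((PySem.Chars.splitOn help_text.toList "\n".toList).all (fun l =>
      !(PySem.Chars.startswith l "  ".toList && !PySem.Chars.startswith l "    ".toList &&
        (PySem.Chars.strip l == [])))) = true
instance (help_text : String) (title : String) : Decidable (Pre_format_help_as_markdown help_text title) := by
  unfold Pre_format_help_as_markdown; infer_instance

def pvWitness_format_help_as_markdown : String × String :=
  ("usage: prog [-h]\n\npositional arguments:\n  file  the input\n      more text", "CLI")

def Spec_format_help_as_markdown (help_text : String) (title : String) (out : String) : Prop := out = format_help_as_markdown_alt help_text title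
instance (help_text : String) (title : String) (out : String) : Decidable (Spec_format_help_as_markdown help_text title out) := by unfold Spec_format_help_as_markdown; infer_instance

-- ===== CLAIM (what is proved, stated in full; the proofs are below) =====
def Claim_equal_format_help_as_markdown : Prop := ∀ (help_text : String) (title : String), Dom_format_help_as_markdown help_text title → Pre_format_help_as_markdown help_text title → Spec_format_help_as_markdown help_text title (format_help_as_markdown help_text title)

-- ===== LEMMAS AND PROOFS =====

-- A's clean-up pass as a function of the raw markdown_lines list
def pvCf (md : List (List Char)) : List (List Char) × Bool := md.foldl pvCleanStep ([], false)

-- the simulation invariant between A's loop state and B's loop state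
def pvInv (a : List (List Char) × Bool × Option (List Char))
    (b : (List (List Char) × Bool × Bool) × Option (List Char)) : Prop :=
  b.2 = a.2.2 ∧
  a.2.1 = decide (a.2.2 = some "usage".toList) ∧
  b.1.1 = (pvCf a.1).1 ∧
  b.1.2.1 = (pvCf a.1).2 ∧
  b.1.2.2 = decide (PySem.List.pyGetD a.1 (-1) ([] : List Char) = [])

theorem pvEmit_cf (amd : List (List Char)) (lre : Bool) (s : List Char) :
    pvEmit ((pvCf amd).1, (pvCf amd).2, lre) s =
      ((pvCf (amd ++ [s])).1, (pvCf (amd ++ [s])).2,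
        decide (PySem.List.pyGetD (amd ++ [s]) (-1) ([] : List Char) = [])) := by
  simp [pvEmit, pvCf, pvCleanStep, List.foldl_append, PySem.List.pyGetD_neg_one_append_singleton]
  split_ifs <;> simp_all

theorem pvStrip_hash (cs : List Char) : PySem.Chars.strip ('#' :: cs) ≠ [] := by
  simp only [PySem.Chars.strip, PySem.Chars.lstrip, PySem.Chars.rstrip]
  have h : List.dropWhile PySem.Chars.isspace ('#' :: cs) = '#' :: cs := by
    simp [PySem.Chars.isspace]
  rw [h]
  intro hc
  have hnil : List.dropWhile PySem.Chars.isspace ('#' :: cs).reverse = [] :=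
    List.reverse_eq_nil_iff.mp hc
  have h3 := List.dropWhile_eq_nil_iff.mp hnil '#' (by simp)
  simp [PySem.Chars.isspace] at h3

theorem pvStep_inv (a : List (List Char) × Bool × Option (List Char))
    (b : (List (List Char) × Bool × Bool) × Option (List Char)) (line : List Char)
    (h : pvInv a b) : pvInv (pvStepA a line) (pvStepB b line) := by
  obtain ⟨amd, aic, asect⟩ := a
  obtain ⟨⟨bout, bpe, blre⟩, bsect⟩ := b
  obtain ⟨h1, h2, h3, h4, h5⟩ := h
  simp only at h1 h2 h3 h4 h5
  subst h3; subst h4; subst h5; subst h1; rw [h2]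
  simp only [pvStepA, pvStepB, pvInv, decide_eq_true_eq]
  split_ifs <;>
    simp_all [pvEmit_cf, List.append_assoc, pvFmtArg]

theorem pvFold_inv (lines : List (List Char))
    (a : List (List Char) × Bool × Option (List Char))
    (b : (List (List Char) × Bool × Bool) × Option (List Char)) (h : pvInv a b) :
    pvInv (lines.foldl pvStepA a) (lines.foldl pvStepB b) := by
  induction lines generalizing a b with
  | nil => exact h
  | cons l ls ih => exact ih _ _ (pvStep_inv a b l h)

theorem pvInv_init (title : String) :
    pvInv (["# ".toList ++ title.toList, []], false, none)
      ((["# ".toList ++ title.toList, []], true, true), none) := by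
  constructor
  · rfl
  refine ⟨by simp, ?_, ?_, ?_⟩
  · have h := pvStrip_hash (' ' :: title.toList)
    have hnil : PySem.Chars.strip ([] : List Char) = [] := rfl
    simp [pvCf, pvCleanStep, h, hnil]
  · have h := pvStrip_hash (' ' :: title.toList)
    have hnil : PySem.Chars.strip ([] : List Char) = [] := rfl
    simp [pvCf, pvCleanStep, h, hnil]
  · have h : (["# ".toList ++ title.toList, ([] : List Char)]) =
        ["# ".toList ++ title.toList] ++ [[]] := rfl
    rw [h, PySem.List.pyGetD_neg_one_append_singleton]
    simp

-- ===== VERDICT (by name: the statement is the Claim_ definition above) =====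
theorem format_help_as_markdown_spec : Claim_equal_format_help_as_markdown := by
  intro help_text title _hdom _hpre
  unfold Spec_format_help_as_markdown
  unfold format_help_as_markdown format_help_as_markdown_alt
  by_cases hempty : PySem.Chars.strip help_text.toList = []
  · simp [hempty]
  · simp only [hempty, if_false]
    have hinv := pvFold_inv (PySem.Chars.splitOn help_text.toList "\n".toList) _ _ (pvInv_init title)
    set sa := (PySem.Chars.splitOn help_text.toList "\n".toList).foldl pvStepA
      (["# ".toList ++ title.toList, []], false, none) with hsa
    set sb := (PySem.Chars.splitOn help_text.toList "\n".toList).foldl pvStepB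
      ((["# ".toList ++ title.toList, []], true, true), none) with hsb
    obtain ⟨h1, h2, h3, h4, h5⟩ := hinv
    by_cases hu : sa.2.2 = some "usage".toList
    · have hic : sa.2.1 = true := by rw [h2]; simp [hu]
      have hb : sb.2 = some "usage".toList := by rw [h1, hu]
      rw [if_pos hic, if_pos hb]
      have hsb1 : sb.1 = ((pvCf sa.1).1, (pvCf sa.1).2, sb.1.2.2) := by
        ext <;> simp [h3, h4]
      rw [hsb1, pvEmit_cf]
      simp [pvCf]
    · have hic : ¬ (sa.2.1 = true) := by rw [h2]; simpa using hu
      have hb : ¬ (sb.2 = some "usage".toList) := by rw [h1]; exact hu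
      rw [if_neg hic, if_neg hb, h3]
      rfl
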